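-- pv_equiv track=rewrite | github.com/DylanAhTeck/NLP-Classifiers | perclearn.py | process
-- ===== SOURCE A (Python) =====
-- def process(list):
--     count = 1
--     MaxIter = 100
--
--     biasB = 0
--     avgBias = 0
--
--     weights = {}
--     ySpam = 1
--     yHam = -1
--
--     for iter in range(1, MaxIter):
--         for (email, label) in list:
--             y = ySpam if label == "spam" else yHam
--
--             activation = 0
--             for word in email:
--                 if word not in weights:
--                     weights[word] = 0
--                 activation += weights[word]
--             activation += biasB
--
--             if activation * y <= 0:
--                 for word in email:
--                     weights[word] = weights[word] + y
--                     biasB = biasB + y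
--
--     return (weights, biasB)
-- ===== SOURCE B (Python) =====
-- def process(list):
--     # Stage 1: build a vocabulary (word -> integer id, first-appearance order)
--     # and index-encode each email as sparse (id, count) pairs with its label sign.
--     vocab = {}
--     data = []
--     for email, label in list:
--         y = 1 if label == "spam" else -1
--         counts = {}
--         for w in email:
--             if w not in vocab:
--                 vocab[w] = len(vocab)
--             i = vocab[w]
--             counts[i] = counts.get(i, 0) + 1
--         data.append(([*counts.items()], y, len(email)))
--     # Stage 2: train on plain integer arrays (no dict in the hot loop).
--     weights = [0] * len(vocab)
--     biasB = 0
--     for _ in range(99):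
--         for items, y, n in data:
--             if (biasB + sum(weights[i] * c for i, c in items)) * y <= 0:
--                 for i, c in items:
--                     weights[i] += y * c
--                 biasB += y * n
--     # Stage 3: materialize the word -> weight dict once.
--     return ({w: weights[i] for w, i in vocab.items()}, biasB)
-- ===== Notes on version B (the rewrite author's own statement) =====
-- stated objective: faster
-- what changed: A single preprocessing pass builds a vocabulary (word -> integer id in first-appearance order) and index-encodes each email as sparse (id,count) pairs with its label sign; the 99 training epochs then run over plain integer arrays (weights is a list indexed by word id; no dict, no membership test, no insertion in the hot loop) and the word->weight dict is materialized once at the end.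
import Mathlib
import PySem

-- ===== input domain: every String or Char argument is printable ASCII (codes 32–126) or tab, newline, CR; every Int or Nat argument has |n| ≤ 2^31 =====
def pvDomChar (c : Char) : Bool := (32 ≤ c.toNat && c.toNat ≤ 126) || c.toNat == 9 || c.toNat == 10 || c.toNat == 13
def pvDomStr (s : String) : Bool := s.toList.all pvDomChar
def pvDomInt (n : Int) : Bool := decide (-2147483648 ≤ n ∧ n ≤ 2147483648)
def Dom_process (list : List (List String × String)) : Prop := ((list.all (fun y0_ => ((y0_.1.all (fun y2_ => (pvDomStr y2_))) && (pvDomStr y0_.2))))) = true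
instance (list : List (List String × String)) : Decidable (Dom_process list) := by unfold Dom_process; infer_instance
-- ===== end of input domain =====

-- B restructures A in three stages: one pass builds a word -> integer-id vocabulary and
-- index-encodes each email as sparse (id, count) pairs; the 99 epochs then train over plain
-- integer lists (no dict in the hot loop; measurably faster by constant factor); the
-- word -> weight dict is materialized once at the end (equal return value, incl. dict order).

-- ===== PORT A =====
-- Literal port of A: per-occurrence activation and update loops; the 'weights[word]' lookup
-- after the default-insert is ported as getD _ 0 (the key is always present there, so exact).
def process (list : List (List String × String)) : (List (String × Int)) × Int :=
  let biasB : Int := 0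
  let weights : PySem.Dict String Int := PySem.Dict.empty
  let ySpam : Int := 1
  let yHam : Int := -1
  let res := (PySem.List.pyRange 1 100 1).foldl (fun (st : PySem.Dict String Int × Int) _ =>
    list.foldl (fun (st : PySem.Dict String Int × Int) ps =>
      let y : Int := if ps.2 = "spam" then ySpam else yHam
      let p := ps.1.foldl (fun (q : PySem.Dict String Int × Int) word =>
          let w := if q.1.contains word then q.1 else q.1.insert word 0
          (w, q.2 + w.getD word 0)) (st.1, 0)
      let activation := p.2 + st.2
      if activation * y ≤ 0 then
        ps.1.foldl (fun (q : PySem.Dict String Int × Int) word =>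
          (q.1.insert word (q.1.getD word 0 + y), q.2 + y)) (p.1, st.2)
      else (p.1, st.2)) st) (weights, biasB)
  (res.1.items, res.2)

-- ===== PORT B =====
-- Literal port of Source B: stage 1 builds vocab (word -> id) and the encoded data list;
-- stage 2 trains over integer lists with pyGetD/pySetD; stage 3 builds the result dict.
def process_alt (list : List (List String × String)) : (List (String × Int)) × Int :=
  let pre := list.foldl (fun (st : PySem.Dict String Int × List (List (Int × Int) × Int × Int)) ps =>
      let y : Int := if ps.2 = "spam" then 1 else -1
      let p := ps.1.foldl (fun (q : PySem.Dict String Int × PySem.Dict Int Int) w =>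
          let v := if q.1.contains w then q.1 else q.1.insert w (q.1.size : Int)
          let i := v.getD w 0
          (v, q.2.insert i (q.2.getD i 0 + 1))) (st.1, PySem.Dict.empty)
      (p.1, st.2 ++ [(p.2.items, y, (ps.1.length : Int))])) (PySem.Dict.empty, [])
  let vocab := pre.1
  let res := (PySem.List.pyRange 0 99 1).foldl (fun (st : List Int × Int) _ =>
    pre.2.foldl (fun (st : List Int × Int) e =>
      if (st.2 + e.1.foldl (fun (a : Int) ic => a + PySem.List.pyGetD st.1 ic.1 0 * ic.2) 0) * e.2.1 ≤ 0 then
        (e.1.foldl (fun (ws : List Int) ic =>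
            PySem.List.pySetD ws ic.1 (PySem.List.pyGetD ws ic.1 0 + e.2.1 * ic.2)) st.1,
         st.2 + e.2.1 * e.2.2)
      else st) st) (PySem.List.pyRepeat [0] (vocab.size : Int), 0)
  ((vocab.items.foldl (fun (d : PySem.Dict String Int) wi =>
      d.insert wi.1 (PySem.List.pyGetD res.1 wi.2 0)) PySem.Dict.empty).items, res.2)

-- ===== PRECONDITION & SPEC =====
def Spec_process (list : List (List String × String)) (out : (List (String × Int)) × Int) : Prop := out = process_alt list
instance (list : List (List String × String)) (out : (List (String × Int)) × Int) : Decidable (Spec_process list out) := by unfold Spec_process; infer_instance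

-- ===== CLAIM (what is proved, stated in full; the proofs are below) =====
def Claim_equal_process : Prop := ∀ (list : List (List String × String)), Dom_process list → Spec_process list (process list)

-- ===== LEMMAS AND PROOFS =====

-- proof-side names for the per-item step functions (definitionally the ports' inner lambdas)
def stepA (st : PySem.Dict String Int × Int) (ps : List String × String) : PySem.Dict String Int × Int :=
  let y : Int := if ps.2 = "spam" then 1 else -1
  let p := ps.1.foldl (fun (q : PySem.Dict String Int × Int) word =>
      let w := if q.1.contains word then q.1 else q.1.insert word 0
      (w, q.2 + w.getD word 0)) (st.1, 0)
  let activation := p.2 + st.2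
  if activation * y ≤ 0 then
    ps.1.foldl (fun (q : PySem.Dict String Int × Int) word =>
      (q.1.insert word (q.1.getD word 0 + y), q.2 + y)) (p.1, st.2)
  else (p.1, st.2)

def stepB (st : List Int × Int) (e : List (Int × Int) × Int × Int) : List Int × Int :=
  if (st.2 + e.1.foldl (fun (a : Int) ic => a + PySem.List.pyGetD st.1 ic.1 0 * ic.2) 0) * e.2.1 ≤ 0 then
    (e.1.foldl (fun (ws : List Int) ic =>
        PySem.List.pySetD ws ic.1 (PySem.List.pyGetD ws ic.1 0 + e.2.1 * ic.2)) st.1,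
     st.2 + e.2.1 * e.2.2)
  else st

def preStep (st : PySem.Dict String Int × List (List (Int × Int) × Int × Int)) (ps : List String × String) :
    PySem.Dict String Int × List (List (Int × Int) × Int × Int) :=
  let y : Int := if ps.2 = "spam" then 1 else -1
  let p := ps.1.foldl (fun (q : PySem.Dict String Int × PySem.Dict Int Int) w =>
      let v := if q.1.contains w then q.1 else q.1.insert w (q.1.size : Int)
      let i := v.getD w 0
      (v, q.2.insert i (q.2.getD i 0 + 1))) (st.1, PySem.Dict.empty)
  (p.1, st.2 ++ [(p.2.items, y, (ps.1.length : Int))])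

-- the vocabulary-insertion step and its folds
def istep (v : PySem.Dict String Int) (w : String) : PySem.Dict String Int :=
  if v.contains w then v else v.insert w (v.size : Int)

def vocAll (v : PySem.Dict String Int) (l : List (List String × String)) : PySem.Dict String Int :=
  l.foldl (fun v ps => ps.1.foldl istep v) v

-- the encoded data entry belonging to an email, keyed by the FINAL vocabulary V
def entry (V : PySem.Dict String Int) (ps : List String × String) : List (Int × Int) × Int × Int :=
  ((PySem.Dict.counter (ps.1.map (fun w => V.getD w 0))).items,
   (if ps.2 = "spam" then (1 : Int) else -1), (ps.1.length : Int))

-- "setdefault with 0": the body of A's activation loop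
def sd (d : PySem.Dict String Int) (x : String) : PySem.Dict String Int :=
  if d.contains x then d else d.insert x 0

-- vocabulary invariant: the values are 0,1,2,… in insertion order
def VInv (v : PySem.Dict String Int) : Prop :=
  v.items.map Prod.snd = (List.range v.size).map Int.ofNat

-- relation between A's weight dict and B's weight array (relative to the final vocab V)
def WRel (V : PySem.Dict String Int) (d : PySem.Dict String Int) (ws : List Int) : Prop :=
  ws.length = V.size ∧ ∀ w ∈ V.keys, d.getD w 0 = PySem.List.pyGetD ws (V.getD w 0) 0

-- ---- sd lemmas (A's activation loop) ----
lemma getD_sd (d : PySem.Dict String Int) (x k : String) : (sd d x).getD k 0 = d.getD k 0 := by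
  unfold sd
  split_ifs with h
  · rfl
  · rw [PySem.Dict.getD_insert]
    split_ifs with hk
    · subst hk
      exact (PySem.Dict.getD_of_not_contains d 0 (by simpa using h)).symm
    · rfl

lemma keys_sd (d : PySem.Dict String Int) (x : String) : (sd d x).keys = PySem.Set.add d.keys x := by
  unfold sd PySem.Set.add
  have hc : d.contains x = PySem.Set.contains d.keys x := by
    simp [PySem.Set.contains, PySem.Dict.contains_eq_decide_mem_keys]
  rw [← hc]
  split_ifs with h
  · rfl
  · exact PySem.Dict.keys_insert_of_not_contains d 0 (by simpa using h)

lemma getD_foldl_sd (l : List String) (d : PySem.Dict String Int) (k : String) :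
    (l.foldl sd d).getD k 0 = d.getD k 0 := by
  induction l generalizing d with
  | nil => rfl
  | cons x t ih => simp only [List.foldl_cons]; rw [ih, getD_sd]

lemma keys_foldl_sd (l : List String) (d : PySem.Dict String Int) :
    (l.foldl sd d).keys = PySem.Set.update d.keys l := by
  induction l generalizing d with
  | nil => rfl
  | cons x t ih =>
    simp only [List.foldl_cons, PySem.Set.update] at *
    rw [ih, keys_sd]

lemma update_of_subset {s : PySem.Set String} {l : List String} (h : ∀ x ∈ l, x ∈ s) :
    PySem.Set.update s l = s := by
  induction l generalizing s with
  | nil => rfl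
  | cons a t ih =>
    simp only [PySem.Set.update, List.foldl_cons] at *
    rw [PySem.Set.add_of_mem (h a (by simp))]
    exact ih (fun x hx => h x (by simp [hx]))

-- A's activation loop in closed form
lemma phase1A (l : List String) :
    ∀ (d : PySem.Dict String Int) (a : Int),
      l.foldl (fun (q : PySem.Dict String Int × Int) word =>
          (if q.1.contains word then q.1 else q.1.insert word 0,
           q.2 + (if q.1.contains word then q.1 else q.1.insert word 0).getD word 0)) (d, a)
        = (l.foldl sd d, a + (l.map (fun w => d.getD w 0)).sum) := by
  induction l with
  | nil => intro d a; simp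
  | cons x t ih =>
    intro d a
    simp only [List.foldl_cons, List.map_cons, List.sum_cons]
    rw [show (if d.contains x then d else d.insert x 0) = sd d x from rfl, getD_sd]
    rw [ih]
    have hmap : t.map (fun w => (sd d x).getD w 0) = t.map (fun w => d.getD w 0) :=
      List.map_congr_left (fun w _ => getD_sd d x w)
    rw [hmap]
    exact congrArg (Prod.mk _) (by ring)

-- A's update loop: final value at each key
lemma updA_getD (y : Int) (l : List String) :
    ∀ (d : PySem.Dict String Int) (v : String),
      (l.foldl (fun d x => d.insert x (d.getD x 0 + y)) d).getD v 0
        = d.getD v 0 + y * (l.count v : Int) := by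
  induction l with
  | nil => intro d v; simp
  | cons x t ih =>
    intro d v
    simp only [List.foldl_cons]
    rw [ih, PySem.Dict.getD_insert]
    by_cases hv : v = x
    · subst hv
      simp
      ring
    · have hxv : (x == v) = false := beq_eq_false_iff_ne.mpr (fun hh => hv hh.symm)
      rw [if_neg hv, List.count_cons]
      simp [hxv]

-- ---- istep / vocabulary lemmas ----
lemma keys_istep (v : PySem.Dict String Int) (w : String) :
    (istep v w).keys = PySem.Set.add v.keys w := by
  unfold istep PySem.Set.add
  have hc : v.contains w = PySem.Set.contains v.keys w := by
    simp [PySem.Set.contains, PySem.Dict.contains_eq_decide_mem_keys]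
  rw [← hc]
  split_ifs with h
  · rfl
  · exact PySem.Dict.keys_insert_of_not_contains v _ (by simpa using h)

lemma getD_istep_of_mem {v : PySem.Dict String Int} {k : String} (h : k ∈ v.keys) (w : String) :
    (istep v w).getD k 0 = v.getD k 0 := by
  unfold istep
  split_ifs with hc
  · rfl
  · rw [PySem.Dict.getD_insert]
    split_ifs with hk
    · subst hk
      exact absurd h (by simpa [PySem.Dict.contains_eq_decide_mem_keys] using hc)
    · rfl

lemma mem_keys_istep {v : PySem.Dict String Int} {k : String} (h : k ∈ v.keys) (w : String) :
    k ∈ (istep v w).keys := by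
  rw [keys_istep]; exact (PySem.Set.mem_add _ _ _).mpr (Or.inl h)

lemma mem_keys_istep_self (v : PySem.Dict String Int) (w : String) : w ∈ (istep v w).keys := by
  rw [keys_istep]; exact (PySem.Set.mem_add _ _ _).mpr (Or.inr rfl)

lemma keys_foldl_istep (l : List String) (v : PySem.Dict String Int) :
    (l.foldl istep v).keys = PySem.Set.update v.keys l := by
  induction l generalizing v with
  | nil => rfl
  | cons x t ih =>
    simp only [List.foldl_cons, PySem.Set.update] at *
    rw [ih, keys_istep]

lemma getD_foldl_istep_of_mem (l : List String) {v : PySem.Dict String Int} {k : String}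
    (h : k ∈ v.keys) : (l.foldl istep v).getD k 0 = v.getD k 0 := by
  induction l generalizing v with
  | nil => rfl
  | cons x t ih =>
    simp only [List.foldl_cons]
    rw [ih (mem_keys_istep h x), getD_istep_of_mem h]

lemma mem_keys_foldl_istep (l : List String) {v : PySem.Dict String Int} {k : String}
    (h : k ∈ v.keys) : k ∈ (l.foldl istep v).keys := by
  rw [keys_foldl_istep]; exact (PySem.Set.mem_update _ _ _).mpr (Or.inl h)

lemma getD_vocAll_of_mem (l : List (List String × String)) {v : PySem.Dict String Int} {k : String}
    (h : k ∈ v.keys) : (vocAll v l).getD k 0 = v.getD k 0 := by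
  induction l generalizing v with
  | nil => rfl
  | cons ps t ih =>
    simp only [vocAll, List.foldl_cons] at *
    rw [ih (mem_keys_foldl_istep ps.1 h), getD_foldl_istep_of_mem ps.1 h]

lemma nodup_keys_istep {v : PySem.Dict String Int} (h : v.keys.Nodup) (w : String) :
    (istep v w).keys.Nodup := by
  unfold istep
  split_ifs with hc
  · exact h
  · exact PySem.Dict.nodup_keys_insert _ _ _ h

lemma VInv_istep {v : PySem.Dict String Int} (h : VInv v) (w : String) : VInv (istep v w) := by
  unfold istep
  split_ifs with hc
  · exact h
  · unfold VInv at *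
    rw [PySem.Dict.items_insert_of_not_contains v _ (by simpa using hc)]
    have hsz : (v.insert w (v.size : Int)).size = v.size + 1 := by
      simp [PySem.Dict.size, PySem.Dict.items_insert_of_not_contains v _ (by simpa using hc)]
    rw [hsz, List.range_succ]
    simp [h]

lemma nodup_keys_foldl_istep (l : List String) {v : PySem.Dict String Int} (h : v.keys.Nodup) :
    (l.foldl istep v).keys.Nodup := by
  induction l generalizing v with
  | nil => exact h
  | cons x t ih => exact ih (nodup_keys_istep h x)

lemma VInv_foldl_istep (l : List String) {v : PySem.Dict String Int} (h : VInv v) :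
    VInv (l.foldl istep v) := by
  induction l generalizing v with
  | nil => exact h
  | cons x t ih => exact ih (VInv_istep h x)

lemma nodup_keys_vocAll (l : List (List String × String)) {v : PySem.Dict String Int}
    (h : v.keys.Nodup) : (vocAll v l).keys.Nodup := by
  induction l generalizing v with
  | nil => exact h
  | cons ps t ih => exact ih (nodup_keys_foldl_istep ps.1 h)

lemma VInv_vocAll (l : List (List String × String)) {v : PySem.Dict String Int} (h : VInv v) :
    VInv (vocAll v l) := by
  induction l generalizing v with
  | nil => exact h
  | cons ps t ih => exact ih (VInv_foldl_istep ps.1 h)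

lemma mem_keys_vocAll (l : List (List String × String)) {v : PySem.Dict String Int} {k : String}
    (h : k ∈ v.keys) : k ∈ (vocAll v l).keys := by
  induction l generalizing v with
  | nil => exact h
  | cons ps t ih => exact ih (mem_keys_foldl_istep ps.1 h)

lemma word_mem_keys_vocAll (l : List (List String × String)) :
    ∀ (v : PySem.Dict String Int), ∀ ps ∈ l, ∀ w ∈ ps.1, w ∈ (vocAll v l).keys := by
  induction l with
  | nil => intro v ps h; cases h
  | cons q t ih =>
    intro v ps hps w hw
    rcases List.mem_cons.mp hps with h1 | h1
    · subst h1
      have : w ∈ (ps.1.foldl istep v).keys := by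
        rw [keys_foldl_istep]
        exact (PySem.Set.mem_update _ _ _).mpr (Or.inr hw)
      exact mem_keys_vocAll t this
    · exact ih (q.1.foldl istep v) ps h1 w hw

lemma keys_vocAll (l : List (List String × String)) (v : PySem.Dict String Int) :
    (vocAll v l).keys = l.foldl (fun s ps => PySem.Set.update s ps.1) v.keys := by
  induction l generalizing v with
  | nil => rfl
  | cons ps t ih =>
    simp only [vocAll, List.foldl_cons] at *
    rw [ih, keys_foldl_istep]

-- consequences of VInv: getD reads off the position in keys; hence values are bounded and injective
lemma getD_VInv {V : PySem.Dict String Int} (hinv : VInv V) (hnd : V.keys.Nodup)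
    (j : Nat) (hj : j < V.keys.length) : V.getD V.keys[j] 0 = (j : Int) := by
  have hkeys : V.keys = V.items.map Prod.fst := rfl
  have hsz : V.size = V.items.length := rfl
  have hj' : j < V.items.length := by
    have : V.keys.length = V.items.length := by rw [hkeys, List.length_map]
    omega
  have h1 : V.keys[j] = (V.items[j]'hj').1 := by
    simp [hkeys]
  have h2 : (V.items[j]'hj').2 = (j : Int) := by
    have hmap := congrArg (fun l => l[j]?) (show V.items.map Prod.snd = (List.range V.size).map Int.ofNat from hinv)
    simp only [List.getElem?_map] at hmap
    rw [List.getElem?_eq_getElem hj'] at hmap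
    have hjr : j < (List.range V.size).length := by simpa [hsz] using hj'
    rw [List.getElem?_eq_getElem hjr] at hmap
    simpa using hmap
  have hmem : (V.keys[j], (j : Int)) ∈ V.items := by
    rw [h1, ← h2]
    exact List.getElem_mem hj'
  exact PySem.Dict.getD_of_mem_items V hmem hnd 0

lemma f_bounds {V : PySem.Dict String Int} (hinv : VInv V) (hnd : V.keys.Nodup)
    {w : String} (h : w ∈ V.keys) : 0 ≤ V.getD w 0 ∧ V.getD w 0 < (V.size : Int) := by
  obtain ⟨j, hj, hw⟩ := List.mem_iff_getElem.mp h
  subst hw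
  rw [getD_VInv hinv hnd j hj]
  have hlen : V.keys.length = V.size := by
    have : V.keys = V.items.map Prod.fst := rfl
    rw [this, List.length_map]; rfl
  constructor
  · exact_mod_cast Nat.zero_le j
  · exact_mod_cast (hlen ▸ hj)

lemma f_inj {V : PySem.Dict String Int} (hinv : VInv V) (hnd : V.keys.Nodup)
    {w w' : String} (h : w ∈ V.keys) (h' : w' ∈ V.keys) (he : V.getD w 0 = V.getD w' 0) :
    w = w' := by
  obtain ⟨j, hj, hw⟩ := List.mem_iff_getElem.mp h
  obtain ⟨j', hj', hw'⟩ := List.mem_iff_getElem.mp h'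
  subst hw hw'
  rw [getD_VInv hinv hnd j hj, getD_VInv hinv hnd j' hj'] at he
  have : j = j' := by exact_mod_cast he
  subst this
  rfl

-- ---- stage-1 characterization ----
-- the inner loop of preStep: vocabulary extension plus a count dict keyed by FINAL ids
lemma inner_pre (email : List String) :
    ∀ (v : PySem.Dict String Int) (c : PySem.Dict Int Int),
      email.foldl (fun (q : PySem.Dict String Int × PySem.Dict Int Int) w =>
          let v' := if q.1.contains w then q.1 else q.1.insert w (q.1.size : Int)
          let i := v'.getD w 0
          (v', q.2.insert i (q.2.getD i 0 + 1))) (v, c)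
        = (email.foldl istep v,
           (email.map (fun w => (email.foldl istep v).getD w 0)).foldl
             (fun c i => c.insert i (c.getD i 0 + 1)) c) := by
  induction email with
  | nil => intro v c; rfl
  | cons w t ih =>
    intro v c
    simp only [List.foldl_cons, List.map_cons]
    show t.foldl _ (istep v w,
        c.insert ((istep v w).getD w 0) (c.getD ((istep v w).getD w 0) 0 + 1)) = _
    rw [ih]
    have hst : (t.foldl istep (istep v w)).getD w 0 = (istep v w).getD w 0 :=
      getD_foldl_istep_of_mem t (mem_keys_istep_self v w)
    rw [hst]

lemma pre_spec (l : List (List String × String)) :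
    ∀ (v : PySem.Dict String Int) (acc : List (List (Int × Int) × Int × Int)),
      l.foldl preStep (v, acc) = (vocAll v l, acc ++ l.map (entry (vocAll v l))) := by
  induction l with
  | nil => intro v acc; simp [vocAll]
  | cons ps t ih =>
    intro v acc
    simp only [List.foldl_cons]
    have hv1 : ps.1.map (fun w => (ps.1.foldl istep v).getD w 0)
        = ps.1.map (fun w => (vocAll (ps.1.foldl istep v) t).getD w 0) := by
      apply List.map_congr_left
      intro w hw
      exact (getD_vocAll_of_mem t (by
        rw [keys_foldl_istep]
        exact (PySem.Set.mem_update _ _ _).mpr (Or.inr hw))).symm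
    have hhead : preStep (v, acc) ps
        = (ps.1.foldl istep v, acc ++ [entry (vocAll (ps.1.foldl istep v) t) ps]) := by
      simp only [preStep]
      rw [inner_pre ps.1 v PySem.Dict.empty,
          PySem.Dict.foldl_insert_getD_add_one_eq_counter, hv1]
      rfl
    rw [hhead, ih]
    simp only [vocAll, List.foldl_cons, List.map_cons, List.append_assoc, List.singleton_append]

-- ---- arithmetic helper: a per-occurrence sum equals the bag (distinct × count) sum ----
lemma sum_split (l : List Int) (p : Int → Bool) (f : Int → Int) :
    (l.map f).sum = ((l.filter p).map f).sum + ((l.filter (fun x => !p x)).map f).sum := by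
  induction l with
  | nil => simp
  | cons a t ih =>
    by_cases h : p a = true <;> simp [h, ih] <;> ring

lemma sum_bag (f : Int → Int) :
    ∀ (ks l : List Int), ks.Nodup → (∀ x ∈ l, x ∈ ks) →
      (l.map f).sum = (ks.map (fun k => f k * (List.count k l : Int))).sum := by
  intro ks
  induction ks with
  | nil =>
    intro l _ h
    cases l with
    | nil => simp
    | cons a t => exact absurd (h a (by simp)) (by simp)
  | cons k rest ih =>
    intro l hnd h
    rw [sum_split l (fun x => x == k) f]
    have h1 : ((l.filter (fun x => x == k)).map f).sum = f k * (List.count k l : Int) := by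
      rw [List.filter_beq, List.map_replicate, List.sum_replicate]
      simp
      ring
    have h2 : ((l.filter (fun x => !(x == k))).map f).sum
        = (rest.map (fun r => f r * (List.count r l : Int))).sum := by
      rw [ih (l.filter (fun x => !(x == k))) hnd.of_cons]
      · apply congrArg
        apply List.map_congr_left
        intro r hr
        have hrk : r ≠ k := fun hrk => (List.nodup_cons.mp hnd).1 (hrk ▸ hr)
        rw [List.count_filter (by simp [hrk])]
      · intro x hx
        have hmem := List.mem_of_mem_filter hx
        have hne : x ≠ k := by simpa using List.of_mem_filter hx
        rcases List.mem_cons.mp (h x hmem) with h' | h'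
        · exact absurd h' hne
        · exact h'
    rw [h1, h2]
    simp

-- counting through an injective-on-keys map
lemma count_map_inj {V : PySem.Dict String Int} (hinv : VInv V) (hnd : V.keys.Nodup)
    {w : String} (hw : w ∈ V.keys) :
    ∀ (l : List String), (∀ x ∈ l, x ∈ V.keys) →
      List.count (V.getD w 0) (l.map (fun x => V.getD x 0)) = List.count w l := by
  intro l
  induction l with
  | nil => intro _; simp
  | cons x t ih =>
    intro hl
    have hbe : (V.getD x 0 == V.getD w 0) = (x == w) := by
      by_cases hxw : x = w
      · subst hxw; simp
      · have hne : V.getD x 0 ≠ V.getD w 0 :=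
          fun he => hxw (f_inj hinv hnd (hl x (by simp)) hw he)
        simp [hxw, hne]
    simp only [List.map_cons, List.count_cons, hbe,
      ih (fun a ha => hl a (List.mem_cons_of_mem _ ha))]

-- ---- stage-2: B's update loop over distinct in-range ids ----
lemma length_foldl_pySetD (ks : List Int) (g : List Int → Int → Int) :
    ∀ ws : List Int,
      (ks.foldl (fun (ws : List Int) k => PySem.List.pySetD ws k (g ws k)) ws).length
        = ws.length := by
  induction ks with
  | nil => intro ws; rfl
  | cons ic t ih =>
    intro ws
    simp only [List.foldl_cons]
    rw [ih, PySem.List.length_pySetD]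

lemma updWs_getD (y : Int) (c : Int → Int) :
    ∀ (ks : List Int), ks.Nodup → ∀ (ws : List Int) (m : Int),
      (∀ k ∈ ks, 0 ≤ k ∧ k < (ws.length : Int)) → 0 ≤ m → m < (ws.length : Int) →
      PySem.List.pyGetD
        (ks.foldl (fun ws k => PySem.List.pySetD ws k (PySem.List.pyGetD ws k 0 + y * c k)) ws) m 0
        = PySem.List.pyGetD ws m 0 + (if m ∈ ks then y * c m else 0) := by
  intro ks
  induction ks with
  | nil => intro _ ws m _ _ _; simp
  | cons k t ih =>
    intro hnd ws m hk hm0 hmlt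
    simp only [List.foldl_cons]
    have hkb := hk k (by simp)
    have hlen1 : (PySem.List.pySetD ws k (PySem.List.pyGetD ws k 0 + y * c k)).length = ws.length :=
      PySem.List.length_pySetD ws k _
    rw [ih hnd.of_cons _ m
      (by intro k' hk'; rw [hlen1]; exact hk k' (by simp [hk'])) hm0 (by rw [hlen1]; exact hmlt)]
    have hknat : k = ((k.toNat : Nat) : Int) := (Int.toNat_of_nonneg hkb.1).symm
    have hmnat : m = ((m.toNat : Nat) : Int) := (Int.toNat_of_nonneg hm0).symm
    have hklt : k.toNat < ws.length := by omega
    by_cases hmk : m = k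
    · subst hmk
      have hv : PySem.List.pyGetD
            (PySem.List.pySetD ws m (PySem.List.pyGetD ws m 0 + y * c m)) m 0
          = PySem.List.pyGetD ws m 0 + y * c m := by
        conv_lhs => rw [hmnat]
        rw [PySem.List.pyGetD_pySetD_natCast ws m.toNat m.toNat _ 0 (by omega)]
        simp [← hmnat]
      have hnt : m ∉ t := (List.nodup_cons.mp hnd).1
      rw [hv]
      simp [hnt]
    · have hv : PySem.List.pyGetD
            (PySem.List.pySetD ws k (PySem.List.pyGetD ws k 0 + y * c k)) m 0
          = PySem.List.pyGetD ws m 0 := by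
        conv_lhs => rw [hknat, hmnat]
        rw [PySem.List.pyGetD_pySetD_natCast ws k.toNat m.toNat _ 0 hklt]
        rw [if_neg (by omega)]
        rw [← hmnat]
      rw [hv]
      simp [List.mem_cons, hmk]

lemma pyGetD_replicate_zero (n : Nat) (i : Int) :
    PySem.List.pyGetD (List.replicate n (0 : Int)) i 0 = 0 := by
  cases h : PySem.List.pyGet? (List.replicate n (0 : Int)) i with
  | none => exact PySem.List.pyGetD_of_none _ _ _ h
  | some x =>
    have hx : x = 0 := List.eq_of_mem_replicate (PySem.List.mem_of_pyGet?_eq_some _ h)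
    subst hx
    simp [PySem.List.pyGetD, h]

-- ---- the per-email step equivalence ----
lemma step_rel (V : PySem.Dict String Int) (hinv : VInv V) (hnd : V.keys.Nodup)
    (ps : List String × String) (hwords : ∀ w ∈ ps.1, w ∈ V.keys)
    (d : PySem.Dict String Int) (ws : List Int) (b : Int)
    (hd : d.keys.Nodup) (hsub : ∀ k ∈ d.keys, k ∈ V.keys) (hrel : WRel V d ws) :
    (stepA (d, b) ps).2 = (stepB (ws, b) (entry V ps)).2
    ∧ (stepA (d, b) ps).1.keys.Nodup
    ∧ (∀ k ∈ (stepA (d, b) ps).1.keys, k ∈ V.keys)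
    ∧ WRel V (stepA (d, b) ps).1 (stepB (ws, b) (entry V ps)).1 := by
  obtain ⟨hlen, hrel⟩ := hrel
  obtain ⟨email, label⟩ := ps
  simp only at hwords
  -- normal form of A's step
  have hA : stepA (d, b) (email, label)
      = (let y := if label = "spam" then (1 : Int) else -1
         if (0 + (email.map (fun w => d.getD w 0)).sum + b) * y ≤ 0 then
           (email.foldl (fun dd w => dd.insert w (dd.getD w 0 + y)) (email.foldl sd d),
            b + (email.length : Int) * y)
         else (email.foldl sd d, b)) := by
    simp only [stepA, phase1A]
    generalize (if label = "spam" then (1 : Int) else -1) = y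
    split_ifs with hc
    · rw [PySem.List.foldl_prod_mk
        (f := fun (dd : PySem.Dict String Int) word => dd.insert word (dd.getD word 0 + y))
        (g := fun (acc : Int) (_ : String) => acc + y)]
      rw [PySem.List.foldl_add email (fun _ => y) b, PySem.List.sum_map_const_int]
    · rfl
  -- normal form of B's step on this entry
  have hB : stepB (ws, b) (entry V (email, label))
      = (let y := if label = "spam" then (1 : Int) else -1
         let l' := email.map (fun w => V.getD w 0)
         if (b + (0 + ((PySem.Set.ofList l').map
               (fun k => PySem.List.pyGetD ws k 0 * (List.count k l' : Int))).sum)) * y ≤ 0 then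
           ((PySem.Set.ofList l').foldl
              (fun ws k => PySem.List.pySetD ws k
                (PySem.List.pyGetD ws k 0 + y * (List.count k l' : Int))) ws,
            b + y * (email.length : Int))
         else (ws, b)) := by
    simp only [stepB, entry, PySem.Dict.items_counter]
    rw [PySem.List.foldl_add, List.map_map, List.foldl_map]
    simp only [Function.comp_def]
  rw [hA, hB]
  simp only []
  -- the two activations agree
  have hsum : (email.map (fun w => d.getD w 0)).sum
      = ((PySem.Set.ofList (email.map (fun w => V.getD w 0))).map
          (fun k => PySem.List.pyGetD ws k 0
            * (List.count k (email.map (fun w => V.getD w 0)) : Int))).sum := by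
    rw [show email.map (fun w => d.getD w 0)
        = (email.map (fun w => V.getD w 0)).map (fun k => PySem.List.pyGetD ws k 0) by
      rw [List.map_map]
      exact List.map_congr_left (fun w hw => by
        simp only [Function.comp_def]
        exact hrel w (hwords w hw))]
    exact sum_bag _ _ _ (PySem.Set.nodup_ofList _)
      (fun x hx => (PySem.Set.mem_ofList _ _).mpr hx)
  have hC : 0 + (email.map (fun w => d.getD w 0)).sum + b
      = b + (0 + ((PySem.Set.ofList (email.map (fun w => V.getD w 0))).map
          (fun k => PySem.List.pyGetD ws k 0
            * (List.count k (email.map (fun w => V.getD w 0)) : Int))).sum) := by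
    rw [hsum]; ring
  rw [hC]
  generalize hy : (if label = "spam" then (1 : Int) else -1) = y
  -- bounds facts for B's ids
  have hbnd : ∀ k ∈ PySem.Set.ofList (email.map (fun w => V.getD w 0)),
      0 ≤ k ∧ k < (ws.length : Int) := by
    intro k hk
    obtain ⟨w, hw, hwk⟩ := List.mem_map.mp ((PySem.Set.mem_ofList _ _).mp hk)
    subst hwk
    have := f_bounds hinv hnd (hwords w hw)
    constructor
    · exact this.1
    · rw [hlen]; exact this.2
  split_ifs with hc
  · refine ⟨by ring, ?_, ?_, ?_, ?_⟩
    · show (email.foldl (fun dd w => dd.insert w (dd.getD w 0 + y)) (email.foldl sd d)).keys.Nodup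
      exact PySem.Dict.nodup_keys_foldl_insert email _ _
        (by rw [keys_foldl_sd]; exact PySem.Set.nodup_update _ _ hd)
    · intro k hk
      rw [PySem.Dict.keys_foldl_insert, keys_foldl_sd] at hk
      rcases (PySem.Set.mem_update _ _ _).mp hk with h1 | h1
      · rcases (PySem.Set.mem_update _ _ _).mp h1 with h2 | h2
        · exact hsub k h2
        · exact hwords k h2
      · exact hwords k h1
    · show ((PySem.Set.ofList (email.map fun w => V.getD w 0)).foldl
          (fun ws k => PySem.List.pySetD ws k
            (PySem.List.pyGetD ws k 0 + y * (List.count k (email.map fun w => V.getD w 0) : Int))) ws).length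
        = V.size
      rw [length_foldl_pySetD
        (g := fun ws k => PySem.List.pyGetD ws k 0
          + y * (List.count k (email.map fun w => V.getD w 0) : Int))]
      exact hlen
    · intro w hwV
      have hAval : ((email.foldl (fun dd w => dd.insert w (dd.getD w 0 + y))
            (email.foldl sd d))).getD w 0 = d.getD w 0 + y * (List.count w email : Int) := by
        rw [updA_getD, getD_foldl_sd]
      have hfb := f_bounds hinv hnd hwV
      have hBval := updWs_getD y (fun k => (List.count k (email.map fun w => V.getD w 0) : Int))
        (PySem.Set.ofList (email.map fun w => V.getD w 0)) (PySem.Set.nodup_ofList _)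
        ws (V.getD w 0) hbnd hfb.1 (by rw [hlen]; exact hfb.2)
      rw [hAval, hBval, hrel w hwV]
      beta_reduce
      by_cases hmem : w ∈ email
      · rw [if_pos ((PySem.Set.mem_ofList _ _).mpr (List.mem_map_of_mem hmem)),
            count_map_inj hinv hnd hwV email hwords]
      · have hno : V.getD w 0 ∉ email.map (fun w => V.getD w 0) := by
          intro hin
          obtain ⟨x, hx, hxe⟩ := List.mem_map.mp hin
          exact hmem (f_inj hinv hnd (hwords x hx) hwV hxe ▸ hx)
        rw [if_neg (fun hin => hno ((PySem.Set.mem_ofList _ _).mp hin)),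
            List.count_eq_zero.mpr hmem]
        simp
  · refine ⟨rfl, ?_, ?_, hlen, ?_⟩
    · show (email.foldl sd d).keys.Nodup
      rw [keys_foldl_sd]; exact PySem.Set.nodup_update _ _ hd
    · intro k hk
      rw [keys_foldl_sd] at hk
      rcases (PySem.Set.mem_update _ _ _).mp hk with h1 | h1
      · exact hsub k h1
      · exact hwords k h1
    · intro w hwV
      show (email.foldl sd d).getD w 0 = PySem.List.pyGetD ws (V.getD w 0) 0
      rw [getD_foldl_sd]
      exact hrel w hwV

-- ---- pass and epoch equivalence ----
lemma pass_rel (V : PySem.Dict String Int) (hinv : VInv V) (hnd : V.keys.Nodup) :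
    ∀ (l : List (List String × String)), (∀ ps ∈ l, ∀ w ∈ ps.1, w ∈ V.keys) →
    ∀ (d : PySem.Dict String Int) (ws : List Int) (b : Int),
      d.keys.Nodup → (∀ k ∈ d.keys, k ∈ V.keys) → WRel V d ws →
      (l.foldl stepA (d, b)).2 = ((l.map (entry V)).foldl stepB (ws, b)).2
      ∧ (l.foldl stepA (d, b)).1.keys.Nodup
      ∧ (∀ k ∈ (l.foldl stepA (d, b)).1.keys, k ∈ V.keys)
      ∧ WRel V (l.foldl stepA (d, b)).1 ((l.map (entry V)).foldl stepB (ws, b)).1 := by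
  intro l
  induction l with
  | nil => intro _ d ws b hd hsub hrel; exact ⟨rfl, hd, hsub, hrel⟩
  | cons ps t ih =>
    intro hl d ws b hd hsub hrel
    simp only [List.foldl_cons, List.map_cons]
    obtain ⟨h2, hnd', hsub', hrel'⟩ :=
      step_rel V hinv hnd ps (hl ps (by simp)) d ws b hd hsub hrel
    rw [show stepB (ws, b) (entry V ps)
        = ((stepB (ws, b) (entry V ps)).1, (stepA (d, b) ps).2) from by rw [h2]]
    exact ih (fun q hq => hl q (by simp [hq])) _ _ _ hnd' hsub' hrel'

lemma foldl_ignore_iterate {σ β : Type} (F : σ → σ) (l : List β) (init : σ) :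
    l.foldl (fun s _ => F s) init = F^[l.length] init := by
  induction l generalizing init with
  | nil => rfl
  | cons x t ih =>
    simp only [List.foldl_cons, List.length_cons, ih, Function.iterate_succ_apply]

lemma epochs_rel (V : PySem.Dict String Int) (hinv : VInv V) (hnd : V.keys.Nodup)
    (list : List (List String × String)) (hwords : ∀ ps ∈ list, ∀ w ∈ ps.1, w ∈ V.keys) :
    ∀ (n : Nat) (d : PySem.Dict String Int) (ws : List Int) (b : Int),
      d.keys.Nodup → (∀ k ∈ d.keys, k ∈ V.keys) → WRel V d ws →
      ((fun st => list.foldl stepA st)^[n] (d, b)).2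
          = ((fun st => (list.map (entry V)).foldl stepB st)^[n] (ws, b)).2
      ∧ ((fun st => list.foldl stepA st)^[n] (d, b)).1.keys.Nodup
      ∧ (∀ k ∈ ((fun st => list.foldl stepA st)^[n] (d, b)).1.keys, k ∈ V.keys)
      ∧ WRel V ((fun st => list.foldl stepA st)^[n] (d, b)).1
          ((fun st => (list.map (entry V)).foldl stepB st)^[n] (ws, b)).1 := by
  intro n
  induction n with
  | zero =>
    intro d ws b hd hsub hrel
    exact ⟨rfl, hd, hsub, hrel⟩
  | succ n ih =>
    intro d ws b hd hsub hrel
    simp only [Function.iterate_succ_apply]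
    obtain ⟨h2, hnd', hsub', hrel'⟩ :=
      pass_rel V hinv hnd list hwords d ws b hd hsub hrel
    rw [show (list.map (entry V)).foldl stepB (ws, b)
        = (((list.map (entry V)).foldl stepB (ws, b)).1, (list.foldl stepA (d, b)).2) from by
      rw [h2]]
    exact ih _ _ _ hnd' hsub' hrel'

-- ---- keys of A's dict after at least one pass ----
lemma stepA_keys (st : PySem.Dict String Int × Int) (ps : List String × String) :
    (stepA st ps).1.keys = PySem.Set.update st.1.keys ps.1 := by
  obtain ⟨d, b⟩ := st
  obtain ⟨email, label⟩ := ps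
  simp only [stepA, phase1A]
  generalize (if label = "spam" then (1 : Int) else -1) = y
  split_ifs with hc
  · rw [PySem.List.foldl_prod_mk
      (f := fun (dd : PySem.Dict String Int) word => dd.insert word (dd.getD word 0 + y))
      (g := fun (acc : Int) (_ : String) => acc + y)]
    show (email.foldl (fun dd word => dd.insert word (dd.getD word 0 + y))
        (email.foldl sd d)).keys = _
    rw [PySem.Dict.keys_foldl_insert, keys_foldl_sd]
    exact update_of_subset (fun x hx => (PySem.Set.mem_update _ _ _).mpr (Or.inr hx))
  · exact keys_foldl_sd email d

lemma pass_keys (l : List (List String × String)) :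
    ∀ st : PySem.Dict String Int × Int,
      (l.foldl stepA st).1.keys = l.foldl (fun s ps => PySem.Set.update s ps.1) st.1.keys := by
  induction l with
  | nil => intro st; rfl
  | cons ps t ih =>
    intro st
    simp only [List.foldl_cons]
    rw [ih, stepA_keys]

lemma upd_fix (l : List (List String × String)) {s : PySem.Set String}
    (h : ∀ ps ∈ l, ∀ w ∈ ps.1, w ∈ s) :
    l.foldl (fun s ps => PySem.Set.update s ps.1) s = s := by
  induction l with
  | nil => rfl
  | cons ps t ih =>
    simp only [List.foldl_cons]
    rw [update_of_subset (h ps (by simp))]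
    exact ih (fun q hq => h q (by simp [hq]))

lemma keys_after_epochs (list : List (List String × String)) (n : Nat) :
    ((fun st => list.foldl stepA st)^[n + 1] ((PySem.Dict.empty : PySem.Dict String Int), (0 : Int))).1.keys
      = (vocAll PySem.Dict.empty list).keys := by
  induction n with
  | zero =>
    simp only [Function.iterate_succ_apply', Function.iterate_zero_apply]
    rw [pass_keys, keys_vocAll]
  | succ n ih =>
    simp only [Function.iterate_succ_apply'] at ih ⊢
    rw [pass_keys, ih]
    exact upd_fix list (fun ps hps w hw => word_mem_keys_vocAll list PySem.Dict.empty ps hps w hw)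

-- ===== VERDICT (by name: the statement is the Claim_ definition above) =====
theorem process_spec : Claim_equal_process := by
  intro list _
  unfold Spec_process
  have hV : VInv (vocAll PySem.Dict.empty list) := VInv_vocAll list (by rfl)
  have hnd : (vocAll PySem.Dict.empty list).keys.Nodup :=
    nodup_keys_vocAll list (by simp [PySem.Dict.keys_empty])
  have hrel0 : WRel (vocAll PySem.Dict.empty list) PySem.Dict.empty
      (List.replicate (vocAll PySem.Dict.empty list).size (0 : Int)) := by
    constructor
    · simp
    · intro w hw
      rw [pyGetD_replicate_zero]
      simp [PySem.Dict.getD_empty]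
  obtain ⟨h2, hnd', hsub', hlen', hrel'⟩ :=
    epochs_rel (vocAll PySem.Dict.empty list) hV hnd list
      (word_mem_keys_vocAll list PySem.Dict.empty) 99
      PySem.Dict.empty (List.replicate (vocAll PySem.Dict.empty list).size 0) 0
      (by simp [PySem.Dict.keys_empty]) (by simp [PySem.Dict.keys_empty]) hrel0
  have hkeys : ((fun st => list.foldl stepA st)^[99]
      ((PySem.Dict.empty : PySem.Dict String Int), (0 : Int))).1.keys
      = (vocAll PySem.Dict.empty list).keys := by
    have := keys_after_epochs list 98
    norm_num at this
    exact this
  -- rewrite both ports into the proof-side iterate form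
  show (((PySem.List.pyRange 1 100 1).foldl (fun st _ => list.foldl stepA st)
        (PySem.Dict.empty, (0 : Int))).1.items,
      ((PySem.List.pyRange 1 100 1).foldl (fun st _ => list.foldl stepA st)
        (PySem.Dict.empty, (0 : Int))).2)
    = (((list.foldl preStep (PySem.Dict.empty, [])).1.items.foldl
          (fun (d : PySem.Dict String Int) wi => d.insert wi.1
            (PySem.List.pyGetD ((PySem.List.pyRange 0 99 1).foldl
              (fun st _ => (list.foldl preStep (PySem.Dict.empty, [])).2.foldl stepB st)
              (PySem.List.pyRepeat [0]
                (((list.foldl preStep (PySem.Dict.empty, [])).1.size : Nat) : Int), 0)).1 wi.2 0))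
          PySem.Dict.empty).items,
       ((PySem.List.pyRange 0 99 1).foldl
          (fun st _ => (list.foldl preStep (PySem.Dict.empty, [])).2.foldl stepB st)
          (PySem.List.pyRepeat [0]
            (((list.foldl preStep (PySem.Dict.empty, [])).1.size : Nat) : Int), 0)).2)
  rw [pre_spec list PySem.Dict.empty []]
  simp only [List.nil_append]
  rw [foldl_ignore_iterate (fun st => list.foldl stepA st) (PySem.List.pyRange 1 100 1)]
  rw [foldl_ignore_iterate
    (fun st => (list.map (entry (vocAll PySem.Dict.empty list))).foldl stepB st)
    (PySem.List.pyRange 0 99 1)]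
  rw [show (PySem.List.pyRange 1 100 1).length = 99 from rfl,
      show (PySem.List.pyRange 0 99 1).length = 99 from rfl]
  rw [PySem.List.pyRepeat_singleton, Int.toNat_natCast]
  refine Prod.ext ?_ h2
  -- first components: the items lists agree
  rw [PySem.Dict.items_eq_map_keys _ hnd' 0, hkeys]
  rw [PySem.Dict.items_foldl_insert_fresh _ Prod.fst
      (fun wi => PySem.List.pyGetD ((fun st =>
        (list.map (entry (vocAll PySem.Dict.empty list))).foldl stepB st)^[99]
        (List.replicate (vocAll PySem.Dict.empty list).size 0, 0)).1 wi.2 0)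
      PySem.Dict.empty (by intro a _; rfl) (by exact hnd)]
  rw [PySem.Dict.items_eq_map_keys _ hnd 0, List.map_map]
  exact List.map_congr_left (fun w hw => by
    simp only [Function.comp_def]
    rw [hrel' w hw])
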